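-- pv_equiv track=rewrite | github.com/Marcos-Nava-GF/DCTN-Gravity | Simulations/Legacy/golden_dctn_suite.py | nearest_prime
-- ===== SOURCE A (Python) =====
-- def is_prime(n):
--     """Verifica si un número de nodos es primo (indivisibilidad topológica)."""
--     if n < 2: return False
--     for i in range(2, int(n**0.5) + 1):
--         if n % i == 0: return False
--     return True
--
-- def nearest_prime(n):
--     """Encuentra la configuración estable (primo) más cercana."""
--     n = int(round(n))
--     if is_prime(n): return n
--     lower, upper = n - 1, n + 1
--     while True:
--         if is_prime(lower): return lower
--         if is_prime(upper): return upper
--         lower -= 1; upper += 1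
-- ===== SOURCE B (Python) =====
-- def is_prime(n):
--     """Verifica si un número de nodos es primo (indivisibilidad topológica)."""
--     if n < 2: return False
--     for i in range(2, int(n**0.5) + 1):
--         if n % i == 0: return False
--     return True
--
-- def nearest_prime(n):
--     """Two directional scans (down to 2, up until a prime) then compare distances; ties go down."""
--     n = int(round(n))
--     if is_prime(n): return n
--     lower = n - 1
--     while lower >= 2 and not is_prime(lower):
--         lower -= 1
--     upper = n + 1
--     while not is_prime(upper):
--         upper += 1
--     if lower >= 2 and n - lower <= upper - n:
--         return lower
--     return upper
-- ===== Notes on version B (the rewrite author's own statement) =====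
-- stated objective: alternative
-- what changed: Replaces A's interleaved twin-pointer loop (lower/upper advanced together, checked alternately each step) by two independent directional scans -- a bounded downward scan to the nearest lower prime (stopping at 2) and an upward scan to the nearest upper prime -- followed by a single distance comparison with ties going to the lower prime.
import Mathlib
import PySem

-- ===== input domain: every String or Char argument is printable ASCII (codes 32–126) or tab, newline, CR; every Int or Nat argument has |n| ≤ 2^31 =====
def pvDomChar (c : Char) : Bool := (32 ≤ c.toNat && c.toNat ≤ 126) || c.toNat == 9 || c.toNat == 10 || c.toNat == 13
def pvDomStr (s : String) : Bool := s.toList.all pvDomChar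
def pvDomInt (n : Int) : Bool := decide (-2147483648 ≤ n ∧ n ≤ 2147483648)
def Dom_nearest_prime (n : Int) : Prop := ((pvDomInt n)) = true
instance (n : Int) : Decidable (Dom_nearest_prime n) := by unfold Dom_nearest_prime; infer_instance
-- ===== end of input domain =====

-- B replaces A's interleaved twin-pointer search by two independent directional scans
-- (down to the nearest lower prime, bounded at 2; up to the nearest upper prime) plus a
-- distance comparison with ties to the lower prime (objective: alternative decomposition).

-- ===== PORT A =====
-- shared helper: both Pythons contain the identical `is_prime` trial division.
-- `int(n**0.5)` equals `Nat.sqrt n.toNat` exactly for the magnitudes in Dom (float sqrt is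
-- exact there); Python's `%` with a positive divisor agrees with PySem.Int.mod.
def py_is_prime (n : Int) : Bool :=
  if n < 2 then false
  else if (PySem.List.pyRange 2 (((Nat.sqrt n.toNat : Nat) : Int) + 1) 1).any
            (fun i => PySem.Int.mod n i == 0) then false
  else true

-- fuel guard making A's `while True` (and B's upward `while`) total; proved never to run
-- out (a prime always appears within the fuel, by Bertrand's postulate).
def pyFuel (n : Int) : Nat := 2 * n.natAbs + 4

def nearestLoop (lower upper : Int) (fuel : Nat) : Int :=
  match fuel with
  | 0 => lower
  | f + 1 =>
    if py_is_prime lower then lower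
    else if py_is_prime upper then upper
    else nearestLoop (lower - 1) (upper + 1) f

-- `int(round(n))` is the identity on int input.
def nearest_prime (n : Int) : Int :=
  if py_is_prime n then n else nearestLoop (n - 1) (n + 1) (pyFuel n)

-- ===== PORT B =====
def downLoop (k : Int) : Int :=
  if h : 2 ≤ k ∧ py_is_prime k = false then downLoop (k - 1) else k
termination_by k.toNat
decreasing_by omega

def upLoop (u : Int) (fuel : Nat) : Int :=
  match fuel with
  | 0 => u
  | f + 1 => if py_is_prime u then u else upLoop (u + 1) f

def nearest_prime_alt (n : Int) : Int :=
  if py_is_prime n then n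
  else
    let lower := downLoop (n - 1)
    let upper := upLoop (n + 1) (pyFuel n)
    if 2 ≤ lower ∧ n - lower ≤ upper - n then lower else upper

-- ===== PRECONDITION & SPEC =====
def Spec_nearest_prime (n : Int) (out : Int) : Prop := out = nearest_prime_alt n
instance (n : Int) (out : Int) : Decidable (Spec_nearest_prime n out) := by unfold Spec_nearest_prime; infer_instance

-- ===== CLAIM (what is proved, stated in full; the proofs are below) =====
def Claim_equal_nearest_prime : Prop := ∀ (n : Int), Dom_nearest_prime n → Spec_nearest_prime n (nearest_prime n)

-- ===== LEMMAS AND PROOFS =====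

theorem py_is_prime_two_le {m : Int} (h : py_is_prime m = true) : 2 ≤ m := by
  unfold py_is_prime at h
  by_contra hlt
  simp [show m < 2 by omega] at h

theorem upLoop_ge : ∀ (fuel : Nat) (u : Int), u ≤ upLoop u fuel := by
  intro fuel
  induction fuel with
  | zero => intro u; simp [upLoop]
  | succ f ih =>
    intro u
    simp only [upLoop]
    split
    · exact le_refl u
    · exact le_trans (by omega) (ih (u + 1))

theorem downLoop_le_aux : ∀ (m : Nat) (k : Int), k.toNat ≤ m → downLoop k ≤ k := by
  intro m
  induction m with
  | zero =>
    intro k hk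
    rw [downLoop]
    split
    · omega
    · exact le_refl k
  | succ m ih =>
    intro k hk
    rw [downLoop]
    split
    · rename_i h
      have := ih (k - 1) (by omega)
      omega
    · exact le_refl k

theorem downLoop_le (k : Int) : downLoop k ≤ k := downLoop_le_aux k.toNat k (le_refl _)

theorem py_is_prime_of_prime (p : Nat) (hp : p.Prime) : py_is_prime (p : Int) = true := by
  have h2 : 2 ≤ p := hp.two_le
  unfold py_is_prime
  have hlt : ¬ ((p : Int) < 2) := by exact_mod_cast not_lt.mpr (by exact_mod_cast h2)
  simp only [hlt, if_false]
  have hany : (PySem.List.pyRange 2 (((Nat.sqrt (p : Int).toNat : Nat) : Int) + 1) 1).any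
      (fun i => PySem.Int.mod (p : Int) i == 0) = false := by
    rw [List.any_eq_false]
    intro i hi
    rw [PySem.List.mem_pyRange_one] at hi
    obtain ⟨hi2, hiu⟩ := hi
    have htn : (p : Int).toNat = p := Int.toNat_natCast p
    rw [htn] at hiu
    simp only [beq_iff_eq]
    intro hmod
    rw [PySem.Int.mod_eq_zero_iff_dvd] at hmod
    have hipos : 0 < i := by omega
    have hidvd : i.toNat ∣ p := by
      have : (i.toNat : Int) ∣ (p : Int) := by rwa [Int.toNat_of_nonneg (le_of_lt hipos)]
      exact_mod_cast this
    rcases (Nat.Prime.eq_one_or_self_of_dvd hp i.toNat hidvd) with h1 | hself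
    · omega
    · have hsq_lt : Nat.sqrt p < p := Nat.sqrt_lt_self hp.one_lt
      omega
  rw [hany]
  rfl

theorem exists_upper_prime (n : Int) :
    ∃ k : Nat, k < pyFuel n ∧ py_is_prime (n + 1 + k) = true := by
  set m : Nat := max 1 (n + 1).toNat with hm
  obtain ⟨p, hp, hmp, hple⟩ := Nat.bertrand m (by omega)
  refine ⟨((p : Int) - (n + 1)).toNat, ?_, ?_⟩
  · unfold pyFuel
    omega
  · have hlt : n + 1 ≤ (p : Int) := by omega
    have : n + 1 + (((p : Int) - (n + 1)).toNat : Int) = (p : Int) := by omega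
    rw [this]
    exact py_is_prime_of_prime p hp

theorem nearestLoop_eq : ∀ (fuel : Nat) (n d : Int), 1 ≤ d →
    (∃ k : Nat, k < fuel ∧ py_is_prime (n + d + k) = true) →
    nearestLoop (n - d) (n + d) fuel =
      (if 2 ≤ downLoop (n - d) ∧ n - downLoop (n - d) ≤ upLoop (n + d) fuel - n
       then downLoop (n - d) else upLoop (n + d) fuel) := by
  intro fuel
  induction fuel with
  | zero => intro n d _ hex; obtain ⟨k, hk, _⟩ := hex; omega
  | succ f ih =>
    intro n d hd hex
    simp only [nearestLoop]
    by_cases hl : py_is_prime (n - d) = true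
    · -- lower prime hit: A returns n - d
      have h2 : 2 ≤ n - d := py_is_prime_two_le hl
      have hdl : downLoop (n - d) = n - d := by
        rw [downLoop]; simp [hl]
      have hub : n + d ≤ upLoop (n + d) (f + 1) := upLoop_ge (f + 1) (n + d)
      simp only [hl, if_true, hdl]
      rw [if_pos ⟨h2, by omega⟩]
    · by_cases hu : py_is_prime (n + d) = true
      · -- upper prime hit: A returns n + d
        have hup : upLoop (n + d) (f + 1) = n + d := by
          simp [upLoop, hu]
        simp only [hl, if_false, hu, if_true, hup, Bool.false_eq_true]
        by_cases h2 : 2 ≤ n - d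
        · have hdl : downLoop (n - d) = downLoop (n - d - 1) := by
            rw [downLoop]
            simp [h2, hl]
          have hle : downLoop (n - d - 1) ≤ n - d - 1 := downLoop_le (n - d - 1)
          rw [hdl, if_neg (by omega)]
        · have hdl : downLoop (n - d) = n - d := by
            rw [downLoop]
            simp only [dif_neg (show ¬ (2 ≤ n - d ∧ py_is_prime (n - d) = false) by tauto)]
          rw [hdl, if_neg (by omega)]
      · -- neither: both loops step
        obtain ⟨k, hk, hkp⟩ := hex
        have hk0 : k ≠ 0 := by
          intro h0; rw [h0] at hkp; simp at hkp; exact hu (by simpa using hkp)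
        have hex' : ∃ k' : Nat, k' < f ∧ py_is_prime (n + (d + 1) + k') = true := by
          refine ⟨k - 1, by omega, ?_⟩
          have : n + (d + 1) + ((k - 1 : Nat) : Int) = n + d + k := by omega
          rw [this]; exact hkp
        have hrec := ih n (d + 1) (by omega) hex'
        have e1 : n - (d + 1) = n - d - 1 := by ring
        have e2 : n + (d + 1) = n + d + 1 := by ring
        rw [e1, e2] at hrec
        simp only [hl, hu, if_false, Bool.false_eq_true]
        rw [hrec]
        have hup : upLoop (n + d) (f + 1) = upLoop (n + d + 1) f := by
          simp [upLoop, hu]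
        by_cases h2 : 2 ≤ n - d
        · have hdl : downLoop (n - d) = downLoop (n - d - 1) := by
            rw [downLoop]; simp [h2, hl]
          rw [hdl, hup]
        · have hdl : downLoop (n - d) = n - d := by
            rw [downLoop]
            simp only [dif_neg (show ¬ (2 ≤ n - d ∧ py_is_prime (n - d) = false) by tauto)]
          have hdl2 : downLoop (n - d - 1) = n - d - 1 := by
            rw [downLoop]
            simp only [dif_neg (show ¬ (2 ≤ n - d - 1 ∧ py_is_prime (n - d - 1) = false) by omega)]
          rw [hdl, hdl2, hup, if_neg (by omega), if_neg (by omega)]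

-- ===== VERDICT (by name: the statement is the Claim_ definition above) =====
theorem nearest_prime_spec : Claim_equal_nearest_prime := by
  intro n _
  unfold Spec_nearest_prime nearest_prime nearest_prime_alt
  by_cases hp : py_is_prime n = true
  · simp [hp]
  · simp only [hp, if_false, Bool.false_eq_true]
    obtain ⟨k, hk, hkp⟩ := exists_upper_prime n
    have := nearestLoop_eq (pyFuel n) n 1 (le_refl 1) ⟨k, hk, by simpa using hkp⟩
    simpa using this
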